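-- pv_equiv track=rewrite | github.com/PlanetWyh/Medi_Vizz | disease_trajectory_type1_v2.py | substitue_levels
-- ===== SOURCE A (Python) =====
-- def substitue_levels(indeces, levels):
--     mult=-1
--     shift=0
--     for el in indeces:
--         if shift>4:
--             shift=0
--         level=levels[el]
--         new_level=((level+shift)*mult)
--         if new_level<0:
--             levels[el]=new_level-5
--         else:
--             levels[el]=new_level
--         mult=mult*-1
--         shift+=4
--     return levels
-- ===== SOURCE B (Python) =====
-- def substitue_levels(indeces, levels):
--     # Process indeces in chunks of two: the first of each pair gets the
--     # negate-transform, the second the +4-transform, with the -5 wrap fused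
--     # into each branch as a direct condition on the old value.
--     n = len(indeces)
--     j = 0
--     while j + 1 < n:
--         el = indeces[j]
--         v = levels[el]
--         levels[el] = -v - 5 if v > 0 else -v
--         el = indeces[j + 1]
--         v = levels[el]
--         levels[el] = v - 1 if v < -4 else v + 4
--         j += 2
--     if j < n:
--         el = indeces[j]
--         v = levels[el]
--         levels[el] = -v - 5 if v > 0 else -v
--     return levels
-- ===== Notes on version B (the rewrite author's own statement) =====
-- stated objective: alternative
-- what changed: Replaced the threaded (mult, shift) state machine with a loop consuming the index list in chunks of two, each half of the pair using a fused closed-form branch on the old value (-v-5 if v>0 else -v; v-1 if v<-4 else v+4), so no sign/shift/parity state remains.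
import Mathlib
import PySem

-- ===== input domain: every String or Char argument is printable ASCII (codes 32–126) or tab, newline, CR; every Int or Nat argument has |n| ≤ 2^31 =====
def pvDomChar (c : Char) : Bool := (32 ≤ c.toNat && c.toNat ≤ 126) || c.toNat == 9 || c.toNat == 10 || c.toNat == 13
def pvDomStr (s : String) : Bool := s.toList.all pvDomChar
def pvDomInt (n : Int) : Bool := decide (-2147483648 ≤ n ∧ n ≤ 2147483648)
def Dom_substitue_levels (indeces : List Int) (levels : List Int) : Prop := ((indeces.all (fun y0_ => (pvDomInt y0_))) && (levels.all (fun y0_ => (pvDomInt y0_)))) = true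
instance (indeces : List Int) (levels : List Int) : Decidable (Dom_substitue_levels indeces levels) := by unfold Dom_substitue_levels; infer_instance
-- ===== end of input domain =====

-- B replaces A's threaded (mult, shift) state machine with a stateless loop that
-- consumes the index list two at a time, each half of the pair using a fused
-- closed-form branch on the old value (objective: alternative).  Both Pythons
-- mutate `levels` in place identically; the equivalence proved is about the
-- return value.

-- ===== PORT A =====
-- A's loop: state (levels, mult, shift), one step per element of indeces.
def substitue_levels (indeces : List Int) (levels : List Int) : List Int :=
  (indeces.foldl
    (fun (st : List Int × Int × Int) el =>
      let shift := if st.2.2 > 4 then 0 else st.2.2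
      let level := PySem.List.pyGetD st.1 el 0
      let new_level := (level + shift) * st.2.1
      let lv := if new_level < 0 then PySem.List.pySetD st.1 el (new_level - 5)
                else PySem.List.pySetD st.1 el new_level
      (lv, st.2.1 * -1, shift + 4))
    (levels, -1, 0)).1

-- ===== PORT B =====
-- B's while loop stepping j by 2 over indeces, with a trailing single step;
-- transcribed as recursion consuming two indices per iteration.
def pvPairLoop : List Int → List Int → List Int
  | [], lv => lv
  | [el], lv =>
      let v := PySem.List.pyGetD lv el 0
      PySem.List.pySetD lv el (if v > 0 then -v - 5 else -v)
  | el1 :: el2 :: rest, lv =>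
      let v1 := PySem.List.pyGetD lv el1 0
      let lv1 := PySem.List.pySetD lv el1 (if v1 > 0 then -v1 - 5 else -v1)
      let v2 := PySem.List.pyGetD lv1 el2 0
      let lv2 := PySem.List.pySetD lv1 el2 (if v2 < -4 then v2 - 1 else v2 + 4)
      pvPairLoop rest lv2

def substitue_levels_alt (indeces : List Int) (levels : List Int) : List Int :=
  pvPairLoop indeces levels

-- ===== PRECONDITION & SPEC =====
-- Pre_ excludes exactly the inputs where A raises IndexError: an index outside Python range.
def Pre_substitue_levels (indeces : List Int) (levels : List Int) : Prop :=
  ∀ el ∈ indeces, PySem.Raise.InRange levels.length el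
instance (indeces : List Int) (levels : List Int) : Decidable (Pre_substitue_levels indeces levels) := by unfold Pre_substitue_levels; infer_instance
def pvWitness_substitue_levels : List Int × List Int := ([0, -1, 1], [3, -2])

def Spec_substitue_levels (indeces : List Int) (levels : List Int) (out : List Int) : Prop := out = substitue_levels_alt indeces levels
instance (indeces : List Int) (levels : List Int) (out : List Int) : Decidable (Spec_substitue_levels indeces levels out) := by unfold Spec_substitue_levels; infer_instance

-- ===== CLAIM (what is proved, stated in full; the proofs are below) =====
def Claim_equal_substitue_levels : Prop := ∀ (indeces : List Int) (levels : List Int), Dom_substitue_levels indeces levels → Pre_substitue_levels indeces levels → Spec_substitue_levels indeces levels (substitue_levels indeces levels)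

-- ===== LEMMAS AND PROOFS =====

-- Invariant: at every pair boundary A's state is (mult = -1, shift = 0 or 8),
-- and two A-steps from there coincide with one pvPairLoop step.
theorem substitue_key (ind : List Int) (lv : List Int) : ∀ s : Int, s = 0 ∨ s = 8 →
    (ind.foldl
      (fun (st : List Int × Int × Int) el =>
        let shift := if st.2.2 > 4 then 0 else st.2.2
        let level := PySem.List.pyGetD st.1 el 0
        let new_level := (level + shift) * st.2.1
        let lv := if new_level < 0 then PySem.List.pySetD st.1 el (new_level - 5)
                  else PySem.List.pySetD st.1 el new_level
        (lv, st.2.1 * -1, shift + 4))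
      (lv, -1, s)).1 = pvPairLoop ind lv := by
  induction ind, lv using pvPairLoop.induct with
  | case1 lv => intro s hs; simp [pvPairLoop]
  | case2 el lv =>
      intro s hs
      have hse : (if s > 4 then (0:Int) else s) = 0 := by rcases hs with h | h <;> simp [h]
      simp only [List.foldl_cons, List.foldl_nil, pvPairLoop, hse]
      have h1 : (PySem.List.pyGetD lv el 0 + 0) * (-1) = -(PySem.List.pyGetD lv el 0) := by ring
      rw [h1]
      split_ifs with h2 h3 h3 <;> first | rfl | (exfalso; omega)
  | case3 el1 el2 rest lv v1 lv1 v2 lv2 ih =>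
      intro s hs
      have hse : (if s > 4 then (0:Int) else s) = 0 := by rcases hs with h | h <;> simp [h]
      simp only [List.foldl_cons, pvPairLoop, hse]
      have h1 : (PySem.List.pyGetD lv el1 0 + 0) * (-1) = -(PySem.List.pyGetD lv el1 0) := by ring
      rw [h1]
      have hstep1 : (if -(PySem.List.pyGetD lv el1 0) < 0 then
            PySem.List.pySetD lv el1 (-(PySem.List.pyGetD lv el1 0) - 5)
          else PySem.List.pySetD lv el1 (-(PySem.List.pyGetD lv el1 0)))
          = PySem.List.pySetD lv el1
              (if PySem.List.pyGetD lv el1 0 > 0 then -(PySem.List.pyGetD lv el1 0) - 5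
               else -(PySem.List.pyGetD lv el1 0)) := by
        split_ifs with h2 h3 h3 <;> first | rfl | (exfalso; omega)
      rw [hstep1]
      norm_num
      have hstep2 : ∀ lw : List Int, (if PySem.List.pyGetD lw el2 0 + 4 < 0 then
            PySem.List.pySetD lw el2 (PySem.List.pyGetD lw el2 0 + 4 - 5)
          else PySem.List.pySetD lw el2 (PySem.List.pyGetD lw el2 0 + 4))
          = PySem.List.pySetD lw el2
              (if PySem.List.pyGetD lw el2 0 < -4 then PySem.List.pyGetD lw el2 0 - 1
               else PySem.List.pyGetD lw el2 0 + 4) := by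
        intro lw
        split_ifs with h3 h4 h4 <;> first | rfl | (exfalso; omega) | (congr 1; omega)
      rw [hstep2]
      have ih8 := ih 8 (Or.inr rfl)
      norm_num at ih8
      exact ih8

-- ===== VERDICT (by name: the statement is the Claim_ definition above) =====
theorem substitue_levels_spec : Claim_equal_substitue_levels := by
  intro indeces levels _ _
  unfold Spec_substitue_levels substitue_levels substitue_levels_alt
  exact substitue_key indeces levels 0 (Or.inl rfl)
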